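-- pv_equiv track=rewrite | github.com/reajis/Egg-drop | Easy/Reach a given score/reach-a-given-score.py | count
-- ===== SOURCE A (Python) =====
-- def count(n):
--     points =[3,5,10]
--     arr = [[0 for cols in range(n+1)] for rows in range (3)]
--     for j in range (n+1):
--         if  j % points [0] ==0:
--             arr[0][j] = 1
--     for i in range (1,3):
--         for j in range(n+1):
--             if j < points[i]:
--                 arr[i][j] = arr[i-1][j]
--             else:
--
--                 arr[i][j] = arr[i-1][j] +arr[i][j-points[i]]
--     return(arr[2][n])
-- ===== SOURCE B (Python) =====
-- # O(1) closed form: the number of ways to write n = 3a+5b+10c is quasi-polynomial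
-- # in n with period 30: count(30q+r) = 3q^2 + B[r]*q + C[r].
-- _B = [3, 2, 1, 3, 2, 4, 3, 2, 4, 3, 5, 4, 3, 5, 4, 6, 5, 4, 6, 5, 7, 6, 5, 7, 6, 8, 7, 6, 8, 7]
-- _C = [1, 0, 0, 1, 0, 1, 1, 0, 1, 1, 2, 1, 1, 2, 1, 3, 2, 1, 3, 2, 4, 3, 2, 4, 3, 5, 4, 3, 5, 4]
--
-- def count(n):
--     q, r = divmod(n, 30)
--     return 3 * q * q + _B[r] * q + _C[r]
-- ===== Notes on version B (the rewrite author's own statement) =====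
-- stated objective: faster
-- what changed: Replaced the 3x(n+1) dynamic-programming table with an O(1) closed-form quasi-polynomial: count(30q+r) = 3q^2 + B[r]q + C[r] with two 30-entry residue tables.
import Mathlib
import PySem

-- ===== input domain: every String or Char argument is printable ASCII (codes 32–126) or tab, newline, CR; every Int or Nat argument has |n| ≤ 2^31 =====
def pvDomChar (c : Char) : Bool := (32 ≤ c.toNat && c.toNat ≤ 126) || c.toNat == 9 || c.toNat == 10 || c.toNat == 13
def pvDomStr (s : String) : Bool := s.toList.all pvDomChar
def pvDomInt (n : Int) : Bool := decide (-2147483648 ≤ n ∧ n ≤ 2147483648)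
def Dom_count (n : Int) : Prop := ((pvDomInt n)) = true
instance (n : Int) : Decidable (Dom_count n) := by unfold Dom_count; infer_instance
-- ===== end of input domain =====

-- B replaces A's 3×(n+1) DP table by an O(1) closed-form quasi-polynomial in n with period 30.

-- ===== PORT A =====
-- literal transliteration of the Python DP: arr is a list of 3 rows, updated in place
-- with arr[i][j] = …; every read/write index is in range when n ≥ 0 (Pre_count), so the
-- total forms pyGetD/pySetD are exact there (for n < 0 the Python raises IndexError).
-- Python list-index helpers for the DP rows, represented as Array Int so that the
-- in-place write arr[i][j] = v is O(1) (the rows are threaded linearly through the folds).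
-- arrGetD a i d = a[i] with default d: exact Python indexing (negative i from the end);
-- default only read where Python would raise (outside Pre_count).
def arrGetD (a : Array Int) (i : Int) (d : Int) : Int :=
  if i < 0 then (if 0 ≤ i + a.size then a.getD (i + a.size).toNat d else d)
  else a.getD i.toNat d

-- setRow a j v = Python a[j] = v: exact for -size ≤ j < size; no-op where Python raises
-- (only outside Pre_count).
def setRow (a : Array Int) (j : Int) (v : Int) : Array Int :=
  if 0 ≤ j then a.setIfInBounds j.toNat v
  else if 0 ≤ j + a.size then a.setIfInBounds (j + a.size).toNat v else a

-- set2D arr i j v = Python arr[i][j] = v for 0 ≤ i (the program only uses i = 0, 1, 2),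
-- keeping the selected row uniquely referenced so the write is in place.
def set2D : List (Array Int) → Int → Int → Int → List (Array Int)
  | [], _, _, _ => []
  | a :: rest, i, j, v =>
      if i = 0 then setRow a j v :: rest
      else a :: set2D rest (i - 1) j v

-- literal transliteration of the Python DP: arr is a list of 3 rows, updated in place
-- with arr[i][j] = …; every read/write index is in range when n ≥ 0 (Pre_count), so the
-- defaulted forms above are exact there (for n < 0 the Python raises IndexError).
def count (n : Int) : Int :=
  let points : List Int := [3, 5, 10]
  let arr : List (Array Int) :=
    (PySem.List.pyRange 0 3 1).map (fun _ => ((PySem.List.pyRange 0 (n + 1) 1).map (fun _ => (0 : Int))).toArray)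
  let arr := (PySem.List.pyRange 0 (n + 1) 1).foldl (fun arr j =>
      if PySem.Int.mod j (PySem.List.pyGetD points 0 0) = 0 then
        set2D arr 0 j 1
      else arr) arr
  let arr := (PySem.List.pyRange 1 3 1).foldl (fun arr i =>
      (PySem.List.pyRange 0 (n + 1) 1).foldl (fun arr j =>
        if j < PySem.List.pyGetD points i 0 then
          set2D arr i j (arrGetD (PySem.List.pyGetD arr (i - 1) #[]) j 0)
        else
          set2D arr i j (arrGetD (PySem.List.pyGetD arr (i - 1) #[]) j 0 +
            arrGetD (PySem.List.pyGetD arr i #[]) (j - PySem.List.pyGetD points i 0) 0)) arr) arr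
  arrGetD (PySem.List.pyGetD arr 2 #[]) n 0

-- ===== PORT B =====
-- the two 30-entry residue tables of Source B
def countBtab : List Int := [3, 2, 1, 3, 2, 4, 3, 2, 4, 3, 5, 4, 3, 5, 4, 6, 5, 4, 6, 5, 7, 6, 5, 7, 6, 8, 7, 6, 8, 7]
def countCtab : List Int := [1, 0, 0, 1, 0, 1, 1, 0, 1, 1, 2, 1, 1, 2, 1, 3, 2, 1, 3, 2, 4, 3, 2, 4, 3, 5, 4, 3, 5, 4]

def count_alt (n : Int) : Int :=
  let q := PySem.Int.floordiv n 30
  let r := PySem.Int.mod n 30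
  3 * q * q + PySem.List.pyGetD countBtab r 0 * q + PySem.List.pyGetD countCtab r 0

-- ===== PRECONDITION & SPEC =====
-- Pre_ excludes exactly n < 0, where the Python A raises IndexError (arr[2][n] on an empty row).
def Pre_count (n : Int) : Prop := 0 ≤ n
instance (n : Int) : Decidable (Pre_count n) := by unfold Pre_count; infer_instance
def pvWitness_count : Int := 13

def Spec_count (n : Int) (out : Int) : Prop := out = count_alt n
instance (n : Int) (out : Int) : Decidable (Spec_count n out) := by unfold Spec_count; infer_instance

-- ===== CLAIM (what is proved, stated in full; the proofs are below) =====
def Claim_equal_count : Prop := ∀ (n : Int), Dom_count n → Pre_count n → Spec_count n (count n)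

-- ===== LEMMAS AND PROOFS =====

-- recursive characterisations of A's three DP rows
def r0 (j : Nat) : Int := if j % 3 = 0 then 1 else 0
def r1 (j : Nat) : Int := if j < 5 then r0 j else r0 j + r1 (j - 5)
def r2 (j : Nat) : Int := if j < 10 then r1 j else r1 j + r2 (j - 10)

-- closed forms matched against B
def c1 (m : Nat) : Int := ((m / 15 : Nat) : Int) + (if m % 15 = 1 ∨ m % 15 = 2 ∨ m % 15 = 4 ∨ m % 15 = 7 then 0 else 1)
def c2 (m : Nat) : Int :=
  3 * ((m / 30 : Nat) : Int) * ((m / 30 : Nat) : Int)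
    + countBtab.getD (m % 30) 0 * ((m / 30 : Nat) : Int) + countCtab.getD (m % 30) 0

theorem r1_eq_c1 : ∀ m, r1 m = c1 m := by
  intro m
  induction m using Nat.strong_induction_on with
  | _ m ih =>
    rw [r1]
    by_cases h5 : m < 5
    · interval_cases m <;> decide
    · rw [if_neg h5, ih (m - 5) (by omega), c1, c1, r0]
      split_ifs <;> omega

theorem count_alt_eq_c2 (n : Int) (hn : 0 ≤ n) : count_alt n = c2 n.toNat := by
  obtain ⟨m, rfl⟩ : ∃ m : Nat, n = (m : Int) := ⟨n.toNat, (Int.toNat_of_nonneg hn).symm⟩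
  have h1 : PySem.Int.floordiv (↑m) 30 = ((m / 30 : Nat) : Int) := by
    exact_mod_cast PySem.Int.floordiv_natCast m 30
  have h2 : PySem.Int.mod (↑m) 30 = ((m % 30 : Nat) : Int) := by
    exact_mod_cast PySem.Int.mod_natCast m 30
  simp only [count_alt, c2, Int.toNat_natCast, h1, h2, PySem.List.pyGetD_natCast]

theorem step_hi (q k : Nat) (hk : 10 ≤ k) (hk30 : k < 30) :
    c1 (30 * q + k) + c2 (30 * q + k - 10) = c2 (30 * q + k) := by
  have d1 : (30 * q + k) / 30 = q := by omega
  have d2 : (30 * q + k) % 30 = k := by omega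
  have d3 : (30 * q + k - 10) / 30 = q := by omega
  have d4 : (30 * q + k - 10) % 30 = k - 10 := by omega
  have d5 : (30 * q + k) / 15 = 2 * q + k / 15 := by omega
  have d6 : (30 * q + k) % 15 = k % 15 := by omega
  simp only [c1, c2, d1, d2, d3, d4, d5, d6]
  interval_cases k <;> (norm_num [countBtab, countCtab, List.getD]) <;> ring

theorem step_lo (q k : Nat) (hk : k < 10) (hq : 1 ≤ q) :
    c1 (30 * q + k) + c2 (30 * q + k - 10) = c2 (30 * q + k) := by
  obtain ⟨p, rfl⟩ : ∃ p, q = p + 1 := ⟨q - 1, by omega⟩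
  have d1 : (30 * (p + 1) + k) / 30 = p + 1 := by omega
  have d2 : (30 * (p + 1) + k) % 30 = k := by omega
  have d3 : (30 * (p + 1) + k - 10) / 30 = p := by omega
  have d4 : (30 * (p + 1) + k - 10) % 30 = k + 20 := by omega
  have d5 : (30 * (p + 1) + k) / 15 = 2 * p + 2 + k / 15 := by omega
  have d6 : (30 * (p + 1) + k) % 15 = k % 15 := by omega
  simp only [c1, c2, d1, d2, d3, d4, d5, d6]
  interval_cases k <;> (norm_num [countBtab, countCtab, List.getD]) <;> ring

theorem r2_eq_c2 : ∀ m, r2 m = c2 m := by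
  intro m
  induction m using Nat.strong_induction_on with
  | _ m ih =>
    rw [r2]
    by_cases h10 : m < 10
    · rw [if_pos h10, r1_eq_c1]
      interval_cases m <;> decide
    · rw [if_neg h10, r1_eq_c1, ih (m - 10) (by omega)]
      obtain ⟨q, k, hk30, rfl⟩ : ∃ q k, k < 30 ∧ m = 30 * q + k := ⟨m / 30, m % 30, by omega, by omega⟩
      rcases lt_or_ge k 10 with hk | hk
      · exact step_lo q k hk (by omega)
      · exact step_hi q k hk hk30

-- partially built DP row: entries below m are h, the rest still 0
def rowPart (h : Nat → Int) (L m : Nat) : List Int :=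
  (List.range L).map (fun j => if j < m then h j else 0)

theorem rowPart_getD (h : Nat → Int) (L m k : Nat) (hk : k < L) :
    (rowPart h L m).getD k 0 = if k < m then h k else 0 :=
  PySem.List.getD_map_range _ _ _ _ hk

theorem rowPart_set (h : Nat → Int) (L m : Nat) (hm : m < L) :
    (rowPart h L m).set m (h m) = rowPart h L (m + 1) := by
  apply List.ext_getElem (by simp [rowPart])
  intro i h1 h2
  have hi : i < L := by simpa [rowPart] using h2
  rcases eq_or_ne i m with rfl | hne
  · simp [rowPart]
  · simp only [rowPart, List.getElem_set, List.getElem_map, List.getElem_range]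
    rw [if_neg (hne.symm)]
    have hiff : i < m ↔ i < m + 1 := by omega
    simp [hiff]

theorem rowPart_succ_of_zero (h : Nat → Int) (L m : Nat) (hz : h m = 0) :
    rowPart h L (m + 1) = rowPart h L m := by
  apply List.ext_getElem (by simp [rowPart])
  intro i h1 h2
  simp only [rowPart, List.getElem_map, List.getElem_range]
  rcases eq_or_ne i m with rfl | hne
  · simp [hz]
  · have hiff : i < m + 1 ↔ i < m := by omega
    simp [hiff]

theorem buildRow (h : Nat → Int) (L : Nat) (step : List Int → Nat → List Int)
    (hstep : ∀ m, m < L → step (rowPart h L m) m = rowPart h L (m + 1)) :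
    ∀ m, m ≤ L → (List.range m).foldl step (rowPart h L 0) = rowPart h L m := by
  intro m
  induction m with
  | zero => simp
  | succ k ih =>
    intro hk
    rw [List.range_succ, List.foldl_append, ih (by omega)]
    simp [hstep k (by omega)]

-- step functions of the three row-building loops, as extracted by shape1/shape2/shape3
def g1 (row : List Int) (k : Nat) : List Int :=
  if PySem.Int.mod (↑k) 3 = 0 then row.set k 1 else row

def g2 (a row : List Int) (k : Nat) : List Int :=
  if (↑k : Int) < 5 then row.set k (PySem.List.pyGetD a (↑k) 0)
  else row.set k (PySem.List.pyGetD a (↑k) 0 + PySem.List.pyGetD row ((↑k : Int) - 5) 0)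

def g3 (b row : List Int) (k : Nat) : List Int :=
  if (↑k : Int) < 10 then row.set k (PySem.List.pyGetD b (↑k) 0)
  else row.set k (PySem.List.pyGetD b (↑k) 0 + PySem.List.pyGetD row ((↑k : Int) - 10) 0)

-- bridges between the Array row operations of the port and their List semantics
theorem arrGetD_nonneg (a : Array Int) (i : Int) (d : Int) (h : 0 ≤ i) :
    arrGetD a i d = PySem.List.pyGetD a.toList i d := by
  unfold arrGetD
  rw [if_neg (not_lt.2 h), PySem.List.pyGetD_of_nonneg _ _ h]
  rcases lt_or_ge i.toNat a.size with hs | hs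
  · simp [Array.getD, List.getD, hs]
  · simp [Array.getD, List.getD, hs]

theorem setRow_toList (a : Array Int) (j : Int) (v : Int) (h : 0 ≤ j) :
    (setRow a j v).toList = PySem.List.pySetD a.toList j v := by
  unfold setRow
  rw [if_pos h, PySem.List.pySetD_of_nonneg _ _ h, Array.toList_setIfInBounds]

theorem shape1 (ks : List Nat) (a b c : Array Int) :
    ks.foldl (fun (x : List (Array Int)) (y : Nat) =>
      if PySem.Int.mod (↑y) 3 = 0 then set2D x 0 (↑y) 1 else x) [a, b, c]
    = [(ks.foldl g1 a.toList).toArray, b, c] := by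
  induction ks generalizing a with
  | nil => simp
  | cons k ks ih =>
    simp only [List.foldl_cons]
    by_cases h : PySem.Int.mod (↑k) 3 = 0
    · rw [if_pos h, show set2D [a, b, c] 0 (↑k) 1 = [setRow a (↑k) 1, b, c] from rfl, ih,
          setRow_toList a (↑k) 1 (by positivity), PySem.List.pySetD_natCast, g1, if_pos h]
    · rw [if_neg h, ih, g1, if_neg h]

theorem shape2 (ks : List Nat) (a b c : Array Int) :
    ks.foldl (fun (x : List (Array Int)) (y : Nat) =>
      if (↑y : Int) < 5 then
        set2D x 1 (↑y) (arrGetD (PySem.List.pyGetD x 0 #[]) (↑y) 0)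
      else
        set2D x 1 (↑y) (arrGetD (PySem.List.pyGetD x 0 #[]) (↑y) 0 +
          arrGetD (PySem.List.pyGetD x 1 #[]) ((↑y : Int) - 5) 0)) [a, b, c]
    = [a, (ks.foldl (g2 a.toList) b.toList).toArray, c] := by
  induction ks generalizing b with
  | nil => simp
  | cons k ks ih =>
    simp only [List.foldl_cons]
    by_cases h : (↑k : Int) < 5
    · rw [if_pos h,
          show set2D [a, b, c] 1 (↑k) (arrGetD (PySem.List.pyGetD [a, b, c] 0 #[]) (↑k) 0)
             = [a, setRow b (↑k) (arrGetD a (↑k) 0), c] from rfl, ih,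
          setRow_toList b (↑k) _ (by positivity), arrGetD_nonneg a (↑k) 0 (by positivity),
          PySem.List.pySetD_natCast, g2, if_pos h]
    · rw [if_neg h,
          show set2D [a, b, c] 1 (↑k) (arrGetD (PySem.List.pyGetD [a, b, c] 0 #[]) (↑k) 0 +
                 arrGetD (PySem.List.pyGetD [a, b, c] 1 #[]) ((↑k : Int) - 5) 0)
             = [a, setRow b (↑k) (arrGetD a (↑k) 0 + arrGetD b ((↑k : Int) - 5) 0), c] from rfl, ih,
          setRow_toList b (↑k) _ (by positivity), arrGetD_nonneg a (↑k) 0 (by positivity),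
          arrGetD_nonneg b ((↑k : Int) - 5) 0 (by omega),
          PySem.List.pySetD_natCast, g2, if_neg h]

theorem shape3 (ks : List Nat) (a b c : Array Int) :
    ks.foldl (fun (x : List (Array Int)) (y : Nat) =>
      if (↑y : Int) < 10 then
        set2D x 2 (↑y) (arrGetD (PySem.List.pyGetD x 1 #[]) (↑y) 0)
      else
        set2D x 2 (↑y) (arrGetD (PySem.List.pyGetD x 1 #[]) (↑y) 0 +
          arrGetD (PySem.List.pyGetD x 2 #[]) ((↑y : Int) - 10) 0)) [a, b, c]
    = [a, b, (ks.foldl (g3 b.toList) c.toList).toArray] := by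
  induction ks generalizing c with
  | nil => simp
  | cons k ks ih =>
    simp only [List.foldl_cons]
    by_cases h : (↑k : Int) < 10
    · rw [if_pos h,
          show set2D [a, b, c] 2 (↑k) (arrGetD (PySem.List.pyGetD [a, b, c] 1 #[]) (↑k) 0)
             = [a, b, setRow c (↑k) (arrGetD b (↑k) 0)] from rfl, ih,
          setRow_toList c (↑k) _ (by positivity), arrGetD_nonneg b (↑k) 0 (by positivity),
          PySem.List.pySetD_natCast, g3, if_pos h]
    · rw [if_neg h,
          show set2D [a, b, c] 2 (↑k) (arrGetD (PySem.List.pyGetD [a, b, c] 1 #[]) (↑k) 0 +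
                 arrGetD (PySem.List.pyGetD [a, b, c] 2 #[]) ((↑k : Int) - 10) 0)
             = [a, b, setRow c (↑k) (arrGetD b (↑k) 0 + arrGetD c ((↑k : Int) - 10) 0)] from rfl, ih,
          setRow_toList c (↑k) _ (by positivity), arrGetD_nonneg b (↑k) 0 (by positivity),
          arrGetD_nonneg c ((↑k : Int) - 10) 0 (by omega),
          PySem.List.pySetD_natCast, g3, if_neg h]

theorem row0_built (L : Nat) :
    (List.range L).foldl g1 (rowPart r0 L 0) = rowPart r0 L L := by
  refine buildRow r0 L g1 (fun m hm => ?_) L le_rfl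
  unfold g1
  have hmod : PySem.Int.mod (↑m) 3 = ((m % 3 : Nat) : Int) := by
    exact_mod_cast PySem.Int.mod_natCast m 3
  by_cases h3 : m % 3 = 0
  · rw [if_pos (by rw [hmod, h3]; rfl)]
    rw [show (1 : Int) = r0 m from by simp [r0, h3]]
    exact rowPart_set r0 L m hm
  · rw [if_neg (by rw [hmod]; exact_mod_cast h3)]
    exact (rowPart_succ_of_zero r0 L m (by simp [r0, h3])).symm

theorem row1_built (L : Nat) :
    (List.range L).foldl (g2 (rowPart r0 L L)) (rowPart r1 L 0) = rowPart r1 L L := by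
  refine buildRow r1 L _ (fun m hm => ?_) L le_rfl
  unfold g2
  have ha : PySem.List.pyGetD (rowPart r0 L L) (↑m) 0 = r0 m := by
    rw [PySem.List.pyGetD_natCast, rowPart_getD r0 L L m hm, if_pos hm]
  by_cases h5 : m < 5
  · rw [if_pos (by exact_mod_cast h5), ha,
        show r0 m = r1 m from by rw [r1, if_pos h5]]
    exact rowPart_set r1 L m hm
  · rw [if_neg (by exact_mod_cast h5), ha]
    have hc : ((m : Int) - 5) = ((m - 5 : Nat) : Int) := by
      push_cast [Nat.cast_sub (by omega : 5 ≤ m)]; ring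
    rw [hc, PySem.List.pyGetD_natCast, rowPart_getD r1 L m (m - 5) (by omega),
        if_pos (by omega)]
    rw [← show r1 m = r0 m + r1 (m - 5) from by rw [r1, if_neg h5]]
    exact rowPart_set r1 L m hm

theorem row2_built (L : Nat) :
    (List.range L).foldl (g3 (rowPart r1 L L)) (rowPart r2 L 0) = rowPart r2 L L := by
  refine buildRow r2 L _ (fun m hm => ?_) L le_rfl
  unfold g3
  have hb : PySem.List.pyGetD (rowPart r1 L L) (↑m) 0 = r1 m := by
    rw [PySem.List.pyGetD_natCast, rowPart_getD r1 L L m hm, if_pos hm]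
  by_cases h10 : m < 10
  · rw [if_pos (by exact_mod_cast h10), hb,
        show r1 m = r2 m from by rw [r2, if_pos h10]]
    exact rowPart_set r2 L m hm
  · rw [if_neg (by exact_mod_cast h10), hb]
    have hc : ((m : Int) - 10) = ((m - 10 : Nat) : Int) := by
      push_cast [Nat.cast_sub (by omega : 10 ≤ m)]; ring
    rw [hc, PySem.List.pyGetD_natCast, rowPart_getD r2 L m (m - 10) (by omega),
        if_pos (by omega)]
    rw [← show r2 m = r1 m + r2 (m - 10) from by rw [r2, if_neg h10]]
    exact rowPart_set r2 L m hm

theorem count_eq_r2 (n : Int) (hn : 0 ≤ n) : count n = r2 n.toNat := by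
  obtain ⟨N, rfl⟩ : ∃ m : Nat, n = (m : Int) := ⟨n.toNat, (Int.toNat_of_nonneg hn).symm⟩
  rw [Int.toNat_natCast]
  have hcast : ((N : Int) + 1) = ((N + 1 : Nat) : Int) := by push_cast; ring
  have hr13 : PySem.List.pyRange 1 3 1 = [1, 2] := by decide
  have hr03 : PySem.List.pyRange 0 3 1 = [0, 1, 2] := by decide
  simp only [count, hcast, hr13, hr03, PySem.List.pyRange_zero_natCast,
    List.foldl_map, List.map_map, List.foldl_cons, List.foldl_nil, List.map_cons, List.map_nil]
  rw [show ((1 : Int) - 1) = 0 from rfl, show ((2 : Int) - 1) = 1 from rfl,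
      show PySem.List.pyGetD [3, 5, 10] (0:Int) (0:Int) = 3 from rfl,
      show PySem.List.pyGetD [3, 5, 10] (1:Int) (0:Int) = 5 from rfl,
      show PySem.List.pyGetD [3, 5, 10] (2:Int) (0:Int) = 10 from rfl]
  rw [shape1]
  rw [show (List.map ((fun (_ : Int) => (0:Int)) ∘ fun (k : Nat) => (↑k : Int)) (List.range (N + 1))).toArray.toList
        = rowPart r0 (N + 1) 0 from by simp [rowPart, Function.comp_def]]
  rw [row0_built]
  rw [shape2, List.toList_toArray,
      show ((List.map ((fun (_ : Int) => (0:Int)) ∘ fun (k : Nat) => (↑k : Int)) (List.range (N + 1))).toArray).toList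
        = rowPart r1 (N + 1) 0 from by simp [rowPart, Function.comp_def],
      row1_built]
  rw [shape3, List.toList_toArray,
      show ((List.map ((fun (_ : Int) => (0:Int)) ∘ fun (k : Nat) => (↑k : Int)) (List.range (N + 1))).toArray).toList
        = rowPart r2 (N + 1) 0 from by simp [rowPart, Function.comp_def],
      row2_built]
  rw [show PySem.List.pyGetD [(rowPart r0 (N+1) (N+1)).toArray, (rowPart r1 (N+1) (N+1)).toArray,
        (rowPart r2 (N+1) (N+1)).toArray] 2 #[] = (rowPart r2 (N+1) (N+1)).toArray from rfl]
  rw [arrGetD_nonneg _ _ _ (by positivity), List.toList_toArray,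
      PySem.List.pyGetD_natCast, rowPart_getD r2 (N+1) (N+1) N (by omega), if_pos (by omega)]
-- ===== VERDICT (by name: the statement is the Claim_ definition above) =====
theorem count_spec : Claim_equal_count := by
  intro n _ hn
  unfold Spec_count
  rw [count_eq_r2 n hn, count_alt_eq_c2 n hn, r2_eq_c2]
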